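-- pv_equiv track=rewrite | github.com/MargaridaEstrela/nvb-analysis | scripts/run_best_configs.py | _participant_prefixes
-- ===== SOURCE A (Python) =====
-- def _participant_prefixes(cols):
--     prefixes = []
--     p1 = [c for c in cols if c.startswith('p1_')]
--     p2 = [c for c in cols if c.startswith('p2_')]
--     A  = [c for c in cols if c.startswith('A_')]
--     B  = [c for c in cols if c.startswith('B_')]
--     if p1 and p2:
--         prefixes = ['p1_', 'p2_']
--     elif A and B:
--         prefixes = ['A_', 'B_']
--     return prefixes
-- ===== SOURCE B (Python) =====
-- def _participant_prefixes(cols):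
--     # Extract every column's 2- and 3-char prefix into a set, then do subset tests.
--     seen = set()
--     for c in cols:
--         seen.add(c[:3])
--         seen.add(c[:2])
--     if {'p1_', 'p2_'} <= seen:
--         return ['p1_', 'p2_']
--     if {'A_', 'B_'} <= seen:
--         return ['A_', 'B_']
--     return []
-- ===== Notes on version B (the rewrite author's own statement) =====
-- stated objective: faster
-- what changed: B never calls startswith: it slices each column's 2- and 3-character prefixes into a set in one pass and then decides by two set-subset tests, instead of A's four per-prefix comprehension scans over cols.
import Mathlib
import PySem

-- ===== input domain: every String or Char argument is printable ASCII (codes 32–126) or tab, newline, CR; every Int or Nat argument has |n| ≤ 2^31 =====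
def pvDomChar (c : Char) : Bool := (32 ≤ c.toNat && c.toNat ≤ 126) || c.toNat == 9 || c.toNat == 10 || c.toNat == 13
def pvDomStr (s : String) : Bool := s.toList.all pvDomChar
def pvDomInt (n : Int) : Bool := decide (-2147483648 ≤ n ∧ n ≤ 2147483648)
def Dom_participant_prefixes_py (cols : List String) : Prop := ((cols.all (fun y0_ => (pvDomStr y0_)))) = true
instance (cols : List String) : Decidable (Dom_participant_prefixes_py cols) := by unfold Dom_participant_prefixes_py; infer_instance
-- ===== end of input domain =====

-- B drops A's four per-prefix startswith scans: one pass slices each column's 2- and 3-char prefixes into a set, then two subset tests decide (a timing run measured B faster by a constant factor).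

-- ===== PORT A =====
def participant_prefixes_py (cols : List String) : List String :=
  let prefixes : List String := []
  let p1 := cols.filter (fun c => PySem.Str.startswith c "p1_")
  let p2 := cols.filter (fun c => PySem.Str.startswith c "p2_")
  let A  := cols.filter (fun c => PySem.Str.startswith c "A_")
  let B  := cols.filter (fun c => PySem.Str.startswith c "B_")
  if !p1.isEmpty && !p2.isEmpty then ["p1_", "p2_"]
  else if !A.isEmpty && !B.isEmpty then ["A_", "B_"]
  else prefixes

-- ===== PORT B =====
-- loop body of Source B: seen.add(c[:3]); seen.add(c[:2])
def pvAddPrefixes (s : PySem.Set String) (c : String) : PySem.Set String :=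
  PySem.Set.add (PySem.Set.add s (PySem.Str.slice c none (some 3))) (PySem.Str.slice c none (some 2))

def participant_prefixes_py_alt (cols : List String) : List String :=
  let seen : PySem.Set String := cols.foldl pvAddPrefixes PySem.Set.empty
  if PySem.Set.issubset (PySem.Set.ofList ["p1_", "p2_"]) seen then ["p1_", "p2_"]
  else if PySem.Set.issubset (PySem.Set.ofList ["A_", "B_"]) seen then ["A_", "B_"]
  else []

-- ===== PRECONDITION & SPEC =====
def Spec_participant_prefixes_py (cols : List String) (out : List String) : Prop := out = participant_prefixes_py_alt cols
instance (cols : List String) (out : List String) : Decidable (Spec_participant_prefixes_py cols out) := by unfold Spec_participant_prefixes_py; infer_instance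

-- ===== CLAIM (what is proved, stated in full; the proofs are below) =====
def Claim_equal_participant_prefixes_py : Prop := ∀ (cols : List String), Dom_participant_prefixes_py cols → Spec_participant_prefixes_py cols (participant_prefixes_py cols)

-- ===== LEMMAS AND PROOFS =====

-- membership in the accumulated prefix set
theorem pv_mem_fold (cols : List String) (s : PySem.Set String) (x : String) :
    x ∈ cols.foldl pvAddPrefixes s ↔
      x ∈ s ∨ ∃ c ∈ cols, x = PySem.Str.slice c none (some 3) ∨ x = PySem.Str.slice c none (some 2) := by
  induction cols generalizing s with
  | nil => simp
  | cons c cs ih =>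
    rw [List.foldl_cons, ih]
    simp only [pvAddPrefixes, PySem.Set.mem_add, List.mem_cons]
    constructor
    · rintro (((hs | h3) | h2) | ⟨c', hc', hor⟩)
      · exact Or.inl hs
      · exact Or.inr ⟨c, Or.inl rfl, Or.inl h3⟩
      · exact Or.inr ⟨c, Or.inl rfl, Or.inr h2⟩
      · exact Or.inr ⟨c', Or.inr hc', hor⟩
    · rintro (hs | ⟨c', rfl | hc', hor⟩)
      · exact Or.inl (Or.inl (Or.inl hs))
      · rcases hor with h3 | h2
        · exact Or.inl (Or.inl (Or.inr h3))
        · exact Or.inl (Or.inr h2)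
      · exact Or.inr ⟨c', hc', hor⟩

-- c[:k] on code points is take k
theorem pv_slice_toList (c : String) (k : Nat) :
    (PySem.Str.slice c none (some (k : Int))).toList = c.toList.take k := by
  simp [PySem.Str.slice, PySem.List.slice_to_natCast]

theorem pv_slice_toList3 (c : String) :
    (PySem.Str.slice c none (some 3)).toList = c.toList.take 3 := by
  exact pv_slice_toList c 3

theorem pv_slice_toList2 (c : String) :
    (PySem.Str.slice c none (some 2)).toList = c.toList.take 2 := by
  exact pv_slice_toList c 2

-- for a prefix string p of length 2 or 3, p is one of c's two slices iff c starts with p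
theorem pv_slices_iff_startswith (c p : String) (h : p.toList.length = 2 ∨ p.toList.length = 3) :
    (p = PySem.Str.slice c none (some 3) ∨ p = PySem.Str.slice c none (some 2))
      ↔ PySem.Str.startswith c p := by
  rw [show (PySem.Str.startswith c p = true) ↔ p.toList <+: c.toList by
        simp [PySem.Chars.startswith_iff]]
  constructor
  · rintro (hp | hp)
    · rw [hp, pv_slice_toList3]; exact List.take_prefix _ _
    · rw [hp, pv_slice_toList2]; exact List.take_prefix _ _
  · intro hpre
    have htake : c.toList.take p.toList.length = p.toList :=
      (List.prefix_iff_eq_take.mp hpre).symm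
    rcases h with h2 | h3
    · right
      apply String.toList_inj.mp
      rw [pv_slice_toList2, ← h2, htake]
    · left
      apply String.toList_inj.mp
      rw [pv_slice_toList3, ← h3, htake]

-- a literal prefix is in the fold iff some column starts with it
theorem pv_mem_fold_iff (cols : List String) (p : String) (h : p.toList.length = 2 ∨ p.toList.length = 3) :
    p ∈ cols.foldl pvAddPrefixes PySem.Set.empty ↔ ∃ c ∈ cols, PySem.Str.startswith c p := by
  rw [pv_mem_fold]
  simp only [PySem.Set.empty]
  constructor
  · rintro (hmem | ⟨c, hc, hor⟩)
    · simp at hmem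
    · exact ⟨c, hc, (pv_slices_iff_startswith c p h).mp hor⟩
  · rintro ⟨c, hc, hsw⟩
    exact Or.inr ⟨c, hc, (pv_slices_iff_startswith c p h).mpr hsw⟩

-- A's "filtered list nonempty" is the same existential
theorem pv_filter_ne (cols : List String) (p : String) :
    (!(cols.filter (fun c => PySem.Str.startswith c p)).isEmpty) = true
      ↔ ∃ c ∈ cols, PySem.Str.startswith c p := by
  simp [List.filter_eq_nil_iff]

-- B's subset test over a two-element literal set is the conjunction of the two memberships
theorem pv_issubset_pair (x y : String) (s : PySem.Set String) (hxy : x ≠ y) :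
    PySem.Set.issubset (PySem.Set.ofList [x, y]) s = true ↔ x ∈ s ∧ y ∈ s := by
  rw [PySem.Set.issubset_iff]
  constructor
  · intro h
    refine ⟨h x ?_, h y ?_⟩ <;> simp [PySem.Set.mem_ofList]
  · rintro ⟨hx, hy⟩ z hz
    rw [PySem.Set.mem_ofList] at hz
    simp only [List.mem_cons, List.not_mem_nil, or_false] at hz
    rcases hz with rfl | rfl
    · exact hx
    · exact hy

-- ===== VERDICT (by name: the statement is the Claim_ definition above) =====
theorem participant_prefixes_py_spec : Claim_equal_participant_prefixes_py := by
  intro cols _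
  unfold Spec_participant_prefixes_py participant_prefixes_py participant_prefixes_py_alt
  have hsub1 := pv_issubset_pair "p1_" "p2_" (cols.foldl pvAddPrefixes PySem.Set.empty) (by decide)
  have hsub2 := pv_issubset_pair "A_" "B_" (cols.foldl pvAddPrefixes PySem.Set.empty) (by decide)
  have m1 := pv_mem_fold_iff cols "p1_" (by right; decide)
  have m2 := pv_mem_fold_iff cols "p2_" (by right; decide)
  have mA := pv_mem_fold_iff cols "A_" (by left; decide)
  have mB := pv_mem_fold_iff cols "B_" (by left; decide)
  simp only []
  by_cases h1 : PySem.Set.issubset (PySem.Set.ofList ["p1_", "p2_"]) (cols.foldl pvAddPrefixes PySem.Set.empty) = true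
  · have := hsub1.mp h1
    rw [m1, m2] at this
    rw [if_pos h1]
    rw [if_pos]
    rw [Bool.and_eq_true, ← pv_filter_ne cols "p1_", ← pv_filter_ne cols "p2_"] at *
    simp_all
  · rw [if_neg h1]
    have hnot : ¬ ((!(cols.filter (fun c => PySem.Str.startswith c "p1_")).isEmpty) &&
                   (!(cols.filter (fun c => PySem.Str.startswith c "p2_")).isEmpty)) = true := by
      intro hcontr
      apply h1
      rw [hsub1, m1, m2]
      rw [Bool.and_eq_true, pv_filter_ne, pv_filter_ne] at hcontr
      exact hcontr
    rw [if_neg hnot]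
    by_cases h2 : PySem.Set.issubset (PySem.Set.ofList ["A_", "B_"]) (cols.foldl pvAddPrefixes PySem.Set.empty) = true
    · rw [if_pos h2]
      rw [if_pos]
      have := hsub2.mp h2
      rw [mA, mB] at this
      rw [Bool.and_eq_true, ← pv_filter_ne cols "A_", ← pv_filter_ne cols "B_"] at *
      simp_all
    · rw [if_neg h2, if_neg]
      intro hcontr
      apply h2
      rw [hsub2, mA, mB]
      rw [Bool.and_eq_true, pv_filter_ne, pv_filter_ne] at hcontr
      exact hcontr
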